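-- pv_equiv track=rewrite | github.com/chrisburke716/historyBookLLM | src/history_book/services/ingestion_service.py | _organize_chapter_titles_by_book
-- ===== SOURCE A (Python) =====
-- from typing import List, Tuple, Optional
--
-- def _organize_chapter_titles_by_book(
--     chapter_titles: List[str]
-- ) -> List[List[str]]:
--     """
--     Group chapter titles by book.
--
--     Args:
--         chapter_titles: A flat list of chapter titles
--
--     Returns:
--         A list of lists, where each inner list contains chapter titles for a book
--     """
--     chapters_by_book = []
--
--     # Find where each book's chapters start in the flat chapter_titles list
--     book_chapter_indices = []
--     current_idx = 0
--
--     # Each book starts with "Introduction"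
--     for i, title in enumerate(chapter_titles):
--         if title == "Introduction" and i > current_idx:
--             book_chapter_indices.append(current_idx)
--             current_idx = i
--
--     # Add the last section
--     book_chapter_indices.append(current_idx)
--     # Add the end index
--     book_chapter_indices.append(len(chapter_titles))
--
--     # Create lists of chapter titles for each book
--     for i in range(len(book_chapter_indices) - 1):
--         start_idx = book_chapter_indices[i]
--         end_idx = book_chapter_indices[i + 1]
--         chapters_by_book.append(chapter_titles[start_idx:end_idx])
--
--     return chapters_by_book
-- ===== SOURCE B (Python) =====
-- def _organize_chapter_titles_by_book(chapter_titles):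
--     books = []
--     current = []
--     for i, title in enumerate(chapter_titles):
--         if title == "Introduction" and i > 0:
--             books.append(current)
--             current = []
--         current.append(title)
--     books.append(current)
--     return books
-- ===== Notes on version B (the rewrite author's own statement) =====
-- stated objective: simpler
-- what changed: Replaced the two-phase algorithm (collect boundary indices, then a second loop slicing the list at each consecutive index pair) with one pass that builds the groups inline in a single accumulator, flushing it at each non-initial 'Introduction'.
import Mathlib
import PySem

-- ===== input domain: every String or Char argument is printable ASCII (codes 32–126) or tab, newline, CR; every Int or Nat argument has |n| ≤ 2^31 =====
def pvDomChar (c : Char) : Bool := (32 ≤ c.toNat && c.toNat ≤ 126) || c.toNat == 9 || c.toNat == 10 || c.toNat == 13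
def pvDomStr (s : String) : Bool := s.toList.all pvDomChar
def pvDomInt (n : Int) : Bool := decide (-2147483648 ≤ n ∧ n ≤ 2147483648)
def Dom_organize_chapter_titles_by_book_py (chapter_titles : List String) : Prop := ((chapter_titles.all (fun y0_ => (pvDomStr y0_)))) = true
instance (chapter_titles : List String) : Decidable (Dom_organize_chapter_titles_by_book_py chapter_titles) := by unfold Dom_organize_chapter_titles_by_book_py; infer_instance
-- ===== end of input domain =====

-- B replaces A's two phases (boundary-index list, then a slicing loop) with one pass
-- that builds the groups inline in a single accumulator; objective: simpler.

-- ===== PORT A =====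
def organize_chapter_titles_by_book_py (chapter_titles : List String) : List (List String) :=
  let chapters_by_book : List (List String) := []
  -- for i, title in enumerate(chapter_titles): if title == "Introduction" and i > current_idx: …
  let st :=
    (PySem.List.enumerate chapter_titles 0).foldl
      (fun (st : List Int × Int) p =>
        if p.2 = "Introduction" ∧ p.1 > st.2 then (st.1 ++ [st.2], p.1) else st)
      ([], 0)
  -- book_chapter_indices.append(current_idx); book_chapter_indices.append(len(chapter_titles))
  let book_chapter_indices := st.1 ++ [st.2] ++ [(chapter_titles.length : Int)]
  -- for i in range(len(book_chapter_indices) - 1): … append(chapter_titles[start_idx:end_idx])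
  (PySem.List.pyRange 0 ((book_chapter_indices.length : Int) - 1) 1).foldl
    (fun acc i =>
      let start_idx := PySem.List.pyGetD book_chapter_indices i 0
      let end_idx := PySem.List.pyGetD book_chapter_indices (i + 1) 0
      acc ++ [PySem.List.slice chapter_titles (some start_idx) (some end_idx)])
    chapters_by_book

-- ===== PORT B =====
def organize_chapter_titles_by_book_py_alt (chapter_titles : List String) : List (List String) :=
  let st :=
    (PySem.List.enumerate chapter_titles 0).foldl
      (fun (st : List (List String) × List String) p =>
        if p.2 = "Introduction" ∧ p.1 > 0 then (st.1 ++ [st.2], [p.2])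
        else (st.1, st.2 ++ [p.2]))
      ([], [])
  st.1 ++ [st.2]

-- ===== PRECONDITION & SPEC =====
def Spec_organize_chapter_titles_by_book_py (chapter_titles : List String) (out : List (List String)) : Prop := out = organize_chapter_titles_by_book_py_alt chapter_titles
instance (chapter_titles : List String) (out : List (List String)) : Decidable (Spec_organize_chapter_titles_by_book_py chapter_titles out) := by unfold Spec_organize_chapter_titles_by_book_py; infer_instance

-- ===== CLAIM (what is proved, stated in full; the proofs are below) =====
def Claim_equal_organize_chapter_titles_by_book_py : Prop := ∀ (chapter_titles : List String), Dom_organize_chapter_titles_by_book_py chapter_titles → Spec_organize_chapter_titles_by_book_py chapter_titles (organize_chapter_titles_by_book_py chapter_titles)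

-- ===== LEMMAS AND PROOFS =====

/-- Consecutive-pair slices of a boundary list: the meaning of A's second loop. -/
def pvPairs (xs : List String) : List Int → List (List String)
  | a :: b :: t => PySem.List.slice xs (some a) (some b) :: pvPairs xs (b :: t)
  | _ => []

theorem pvPairs_snoc2 (xs : List String) (zs : List Int) (a b : Int) :
    pvPairs xs (zs ++ [a, b]) = pvPairs xs (zs ++ [a]) ++ [PySem.List.slice xs (some a) (some b)] := by
  induction zs with
  | nil => simp [pvPairs]
  | cons z zs ih =>
    cases zs with
    | nil => simp [pvPairs]
    | cons w ws => simpa [pvPairs] using ih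

/-- A's slicing loop over `range(len(idxs) - 1)` computes exactly the consecutive-pair slices. -/
theorem pvSliceLoop_eq_pairs (xs : List String) (idxs : List Int) :
    (PySem.List.pyRange 0 ((idxs.length : Int) - 1) 1).foldl
      (fun acc i =>
        acc ++ [PySem.List.slice xs (some (PySem.List.pyGetD idxs i 0))
                  (some (PySem.List.pyGetD idxs (i + 1) 0))])
      ([] : List (List String)) = pvPairs xs idxs := by
  rw [PySem.List.foldl_append_singleton_eq_map, PySem.List.pyRange_one]
  simp only [List.map_map]
  induction idxs with
  | nil => simp [pvPairs]
  | cons a t ih =>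
    cases t with
    | nil => simp [pvPairs]
    | cons b t' =>
      have hlen : ((((a :: b :: t').length : Int) - 1 - 0).toNat) = t'.length + 1 := by
        simp
      rw [hlen, List.range_succ_eq_map]
      have hlen' : ((((b :: t').length : Int) - 1 - 0).toNat) = t'.length := by
        simp
      rw [hlen'] at ih
      simp only [List.map_cons, List.map_map, pvPairs, List.nil_append]
      simp only [List.nil_append] at ih
      congr 1
      · simp [PySem.List.pyGetD]
      · rw [← ih]
        refine List.map_congr_left ?_
        intro k _
        simp only [Function.comp]
        have h1 : ((0 : Int) + ((k + 1 : Nat) : Int)) = (((k + 1 : Nat) : Int)) := by ring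
        have h2 : ((0 : Int) + ((k : Nat) : Int)) = (((k : Nat) : Int)) := by ring
        rw [h1, h2]
        have g1 : PySem.List.pyGetD (a :: b :: t') (((k + 1 : Nat) : Int)) 0
            = PySem.List.pyGetD (b :: t') ((k : Nat) : Int) 0 := by
          rw [PySem.List.pyGetD_natCast, PySem.List.pyGetD_natCast]
          simp [List.getD]
        have g2 : PySem.List.pyGetD (a :: b :: t') (((k + 1 : Nat) : Int) + 1) 0
            = PySem.List.pyGetD (b :: t') (((k : Nat) : Int) + 1) 0 := by
          have : (((k + 1 : Nat) : Int) + 1) = (((k + 2 : Nat) : Int)) := by push_cast; ring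
          rw [this]
          have : (((k : Nat) : Int) + 1) = (((k + 1 : Nat) : Int)) := by push_cast; ring
          rw [this, PySem.List.pyGetD_natCast, PySem.List.pyGetD_natCast]
          simp [List.getD]
        rw [g1, g2]
  
/-- Main invariant: from index `s` on, A's boundary collection followed by pairwise
    slicing gives the same groups as B's inline accumulation. -/
theorem pvMain (xs : List String) :
    ∀ (l : List String) (s c : Nat) (acc : List Int) (books : List (List String)),
      s ≤ xs.length → l = xs.drop s → (c < s ∨ (s = 0 ∧ c = 0)) →
      (∀ (e : Nat), s ≤ e → e ≤ xs.length →
        pvPairs xs (acc ++ [(c : Int), (e : Int)]) = books ++ [(xs.drop c).take (e - c)]) →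
      pvPairs xs
        (((PySem.List.enumerate l (s : Int)).foldl
            (fun (st : List Int × Int) p =>
              if p.2 = "Introduction" ∧ p.1 > st.2 then (st.1 ++ [st.2], p.1) else st)
            (acc, (c : Int))).1 ++
          [((PySem.List.enumerate l (s : Int)).foldl
              (fun (st : List Int × Int) p =>
                if p.2 = "Introduction" ∧ p.1 > st.2 then (st.1 ++ [st.2], p.1) else st)
              (acc, (c : Int))).2, (xs.length : Int)]) =
      ((PySem.List.enumerate l (s : Int)).foldl
          (fun (st : List (List String) × List String) p =>
            if p.2 = "Introduction" ∧ p.1 > 0 then (st.1 ++ [st.2], [p.2])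
            else (st.1, st.2 ++ [p.2]))
          (books, (xs.drop c).take (s - c))).1 ++
        [((PySem.List.enumerate l (s : Int)).foldl
            (fun (st : List (List String) × List String) p =>
              if p.2 = "Introduction" ∧ p.1 > 0 then (st.1 ++ [st.2], [p.2])
              else (st.1, st.2 ++ [p.2]))
            (books, (xs.drop c).take (s - c))).2] := by
  intro l
  induction l with
  | nil =>
    intro s c acc books hs hdrop _ H
    have hsl : s = xs.length := by
      have := congrArg List.length hdrop
      simp [List.length_drop] at this
      omega
    simp only [PySem.List.enumerate_nil, List.foldl_nil]
    have := H xs.length (by omega) (by omega)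
    simpa [hsl] using this
  | cons t rest ih =>
    intro s c acc books hs hdrop hinv H
    have hslt : s < xs.length := by
      by_contra h
      have : xs.drop s = [] := List.drop_eq_nil_of_le (by omega)
      rw [this] at hdrop; exact absurd hdrop (by simp)
    have hget : xs[s]? = some t := by
      have := congrArg List.head? hdrop
      rw [List.head?_drop] at this
      simpa using this.symm
    have hrest : rest = xs.drop (s + 1) := by
      have := congrArg List.tail hdrop
      simpa [List.tail_drop] using this
    rw [PySem.List.enumerate_cons]
    simp only [List.foldl_cons]
    by_cases hc : t = "Introduction" ∧ (s : Nat) > 0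
    · -- boundary: both conditions fire
      have hcs : c < s := by rcases hinv with h | h; exact h; omega
      have hA : (t = "Introduction" ∧ (s : Int) > (c : Int)) := ⟨hc.1, by exact_mod_cast hcs⟩
      rw [if_pos (by simpa using hA), if_pos (by simpa using hc)]
      have := ih (s + 1) s (acc ++ [(c : Int)]) (books ++ [(xs.drop c).take (s - c)])
        (by omega) hrest (by omega) ?_
      · -- fix up the current-accumulator literal
        have hcur : (xs.drop s).take (s + 1 - s) = [t] := by
          rw [hdrop.symm]; simp
        have hc2 : ((s + 1 : Nat) : Int) = (s : Int) + 1 := by push_cast; ring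
        rw [hcur, hc2] at this
        exact this
      · intro e he hel
        have step1 : pvPairs xs ((acc ++ [(c : Int)]) ++ [(s : Int), (e : Int)]) =
            pvPairs xs ((acc ++ [(c : Int)]) ++ [(s : Int)]) ++
              [PySem.List.slice xs (some (s : Int)) (some (e : Int))] :=
          pvPairs_snoc2 xs _ _ _
        have step2 : pvPairs xs ((acc ++ [(c : Int)]) ++ [(s : Int)]) =
            books ++ [(xs.drop c).take (s - c)] := by
          have := H s (by omega) (by omega)
          simpa [List.append_assoc] using this
        have step3 : PySem.List.slice xs (some (s : Int)) (some (e : Int)) =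
            (xs.drop s).take (e - s) := PySem.List.slice_natCast xs s e
        rw [step1, step2, step3]
    · -- not a boundary: both conditions fail
      have hAneg : ¬ (t = "Introduction" ∧ (s : Int) > (c : Int)) := by
        intro ⟨h1, h2⟩
        exact hc ⟨h1, by rcases hinv with h | h; omega; omega⟩
      rw [if_neg (by simpa using hAneg), if_neg (by simpa using hc)]
      have := ih (s + 1) c acc books (by omega) hrest (by omega) ?_
      · have hcur : (xs.drop c).take (s + 1 - c) = (xs.drop c).take (s - c) ++ [t] := by
          have hcc : c ≤ s := by rcases hinv with h | h <;> omega
          have hsub : s + 1 - c = (s - c) + 1 := by omega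
          rw [hsub, List.take_add_one]
          congr 1
          rw [List.getElem?_drop, (show c + (s - c) = s by omega), hget]
          rfl
        have hc2 : ((s + 1 : Nat) : Int) = (s : Int) + 1 := by push_cast; ring
        rw [hcur, hc2] at this
        exact this
      · intro e he hel
        exact H e (by omega) hel

-- ===== VERDICT (by name: the statement is the Claim_ definition above) =====
theorem organize_chapter_titles_by_book_py_spec : Claim_equal_organize_chapter_titles_by_book_py := by
  intro xs _
  unfold Spec_organize_chapter_titles_by_book_py
  unfold organize_chapter_titles_by_book_py organize_chapter_titles_by_book_py_alt
  rw [pvSliceLoop_eq_pairs]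
  have h0 : ((0 : Nat) : Int) = (0 : Int) := rfl
  have := pvMain xs xs 0 0 [] [] (by omega) (by simp) (by omega) ?_
  · simpa using this
  · intro e _ hel
    simp [pvPairs]
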